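-- pv_equiv track=rewrite | github.com/shirarab/boggle | ex12_utils.py | is_valid_path
-- ===== SOURCE A (Python) =====
-- from typing import List, Tuple, Dict, Optional
--
-- DIRECTIONS = [(-1, 0), (1, 0), (0, 1), (0, -1),
--               (-1, 1), (-1, -1), (1, -1), (1, 1)]
--
-- cell_th = Tuple[int, int]
--
-- path_th = List[cell_th]
--
-- board_th = List[List[str]]
--
-- words_th = Dict[str, bool]
--
-- def is_cell_in_board(board: board_th, i: int, j: int) -> bool:
--     i_size: int = len(board)
--     j_size: int = len(board[0])
--     return 0 <= i < i_size and 0 <= j < j_size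
--
-- def is_direction_valid(cell: cell_th, next_cell: cell_th) -> bool:
--     i, j = cell
--     next_i, next_j = next_cell
--     return (next_i - i, next_j - j) in DIRECTIONS
--
-- def is_valid_path(board: board_th, path: path_th, words: words_th)\
--                   -> Optional[str]:
--     if not len(board):
--         return
--     word: str = ""
--     for ind, cell in enumerate(path):
--         # no duplicates
--         if path.count(cell) > 1:
--             return
--         # i,j is in brd
--         i, j = cell
--         if not is_cell_in_board(board, *cell):
--             return
--         # directions are valid
--         if ind < len(path) - 1 and not is_direction_valid(cell, path[ind + 1]):
--             return
--
--         # if valid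
--         word += board[i][j]
--
--     if word not in words:
--         return
--     return word
-- ===== SOURCE B (Python) =====
-- def _cell(board, i, j):
--     """The letter at (i, j), or None if the cell is off the board."""
--     if 0 <= i < len(board) and 0 <= j < len(board[0]):
--         return board[i][j]
--     return None
--
--
-- def _adjacent(a, b):
--     di = b[0] - a[0]
--     dj = b[1] - a[1]
--     return -1 <= di <= 1 and -1 <= dj <= 1 and (di, dj) != (0, 0)
--
--
-- def _walk(board, path):
--     """Consume the path recursively; the word is assembled back-to-front
--     (letter + word of the rest) on the way out of the recursion."""
--     if not path:
--         return ""
--     cell = path[0]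
--     rest = path[1:]
--     if cell in rest:
--         return None
--     if rest and not _adjacent(cell, rest[0]):
--         return None
--     letter = _cell(board, cell[0], cell[1])
--     if letter is None:
--         return None
--     tail = _walk(board, rest)
--     if tail is None:
--         return None
--     return letter + tail
--
--
-- def is_valid_path(board, path, words):
--     if not board:
--         return None
--     word = _walk(board, path)
--     if word is not None and word in words:
--         return word
--     return None
-- ===== Notes on version B (the rewrite author's own statement) =====
-- stated objective: alternative
-- what changed: A's indexed enumerate-loop (global path.count per step, bounds predicate over the whole board, direction by membership in the 8-tuple DIRECTIONS list, word appended front-to-back) is replaced by a structural recursion over the path that checks duplicates by 'cell in remaining suffix', tests adjacency arithmetically (-1<=di<=1, -1<=dj<=1, (di,dj)!=(0,0)), reads the letter through an Optional cell lookup, and assembles the word back-to-front as letter + word(rest).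
-- outside the precondition, e.g. on is_valid_path([['a'], []], [(5, 0), (1, 0)], {}): A returns None, B returns None
import Mathlib
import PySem

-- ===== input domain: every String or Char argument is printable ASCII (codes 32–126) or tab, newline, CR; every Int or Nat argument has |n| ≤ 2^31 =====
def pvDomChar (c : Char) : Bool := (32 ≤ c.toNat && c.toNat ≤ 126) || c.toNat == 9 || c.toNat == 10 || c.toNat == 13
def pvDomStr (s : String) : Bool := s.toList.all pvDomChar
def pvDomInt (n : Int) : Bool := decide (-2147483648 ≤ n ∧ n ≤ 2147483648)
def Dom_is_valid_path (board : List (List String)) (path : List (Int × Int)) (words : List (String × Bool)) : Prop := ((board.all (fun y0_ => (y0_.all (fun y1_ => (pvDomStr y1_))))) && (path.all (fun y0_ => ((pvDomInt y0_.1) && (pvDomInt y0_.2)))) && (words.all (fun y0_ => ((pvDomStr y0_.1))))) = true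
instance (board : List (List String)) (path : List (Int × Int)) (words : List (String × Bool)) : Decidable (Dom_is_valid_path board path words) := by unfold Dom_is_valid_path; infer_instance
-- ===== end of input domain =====

-- B replaces A's indexed enumerate-loop (global path.count per step, direction by
-- membership in the DIRECTIONS list, word appended front-to-back) by a structural
-- recursion over the path: duplicate = head ∈ remaining suffix, adjacency by the
-- arithmetic test -1 ≤ di,dj ≤ 1 ∧ (di,dj) ≠ (0,0), letter through an Optional cell
-- lookup, word assembled back-to-front; same return value (objective: alternative).

-- ===== PORT A =====
def pyDirections : List (Int × Int) :=
  [(-1, 0), (1, 0), (0, 1), (0, -1), (-1, 1), (-1, -1), (1, -1), (1, 1)]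

def is_cell_in_board_port (board : List (List String)) (i : Int) (j : Int) : Bool :=
  -- i_size = len(board); j_size = len(board[0]) (only called with nonempty board)
  decide (0 ≤ i) && decide (i < (board.length : Int)) &&
  decide (0 ≤ j) && decide (j < ((board.headD []).length : Int))

def is_direction_valid_port (cell : Int × Int) (next_cell : Int × Int) : Bool :=
  pyDirections.contains (next_cell.1 - cell.1, next_cell.2 - cell.2)

-- the 'for ind, cell in enumerate(path)' loop; board[i][j] via pyGetD (in range whenever
-- Python does not raise, i.e. inside Pre_)
def is_valid_path_loop (board : List (List String)) (path : List (Int × Int))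
    (pairs : List (Int × (Int × Int))) (word : String) : Option String :=
  match pairs with
  | [] => some word
  | (ind, cell) :: rest =>
    if PySem.List.count path cell > 1 then none
    else if !is_cell_in_board_port board cell.1 cell.2 then none
    else if decide (ind < (path.length : Int) - 1) &&
            !is_direction_valid_port cell (PySem.List.pyGetD path (ind + 1) (0, 0)) then none
    else is_valid_path_loop board path rest
      (word ++ PySem.List.pyGetD (PySem.List.pyGetD board cell.1 []) cell.2 "")

def is_valid_path (board : List (List String)) (path : List (Int × Int)) (words : List (String × Bool)) : Option String :=
  if board.length = 0 then none
  else
    match is_valid_path_loop board path (PySem.List.enumerate path) "" with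
    | none => none
    | some word => if !(words.any (fun p => p.1 == word)) then none else some word

-- ===== PORT B =====
-- _cell: the letter at (i, j), or none off the board (board[i][j] via pyGetD, in range
-- whenever Python does not raise, i.e. inside Pre_)
def pvCell (board : List (List String)) (i : Int) (j : Int) : Option String :=
  if decide (0 ≤ i) && decide (i < (board.length : Int)) &&
     decide (0 ≤ j) && decide (j < ((board.headD []).length : Int)) then
    some (PySem.List.pyGetD (PySem.List.pyGetD board i []) j "")
  else none

-- _adjacent
def pvAdjacent (a : Int × Int) (b : Int × Int) : Bool :=
  let di := b.1 - a.1
  let dj := b.2 - a.2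
  decide (-1 ≤ di) && decide (di ≤ 1) && decide (-1 ≤ dj) && decide (dj ≤ 1) &&
  !((di, dj) == ((0 : Int), (0 : Int)))

-- _walk: structural recursion over the path, word built back-to-front
def pvWalk (board : List (List String)) : List (Int × Int) → Option String
  | [] => some ""
  | cell :: rest =>
    if rest.contains cell then none
    else if (!rest.isEmpty) && !pvAdjacent cell (rest.headD (0, 0)) then none
    else
      match pvCell board cell.1 cell.2 with
      | none => none
      | some letter =>
        match pvWalk board rest with
        | none => none
        | some tail => some (letter ++ tail)

def is_valid_path_alt (board : List (List String)) (path : List (Int × Int)) (words : List (String × Bool)) : Option String :=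
  if board.length = 0 then none
  else
    match pvWalk board path with
    | none => none
    | some word => if words.any (fun p => p.1 == word) then some word else none

-- ===== PRECONDITION & SPEC =====
-- Pre_ excludes ragged boards reachable through the path: a path cell that passes A's
-- bounds check (which measures every row by row 0's width) but whose own row is shorter
-- makes Python A raise IndexError when it is reached (B raises there too; when an
-- earlier cell already fails, A merely returns None there, as does B).
def Pre_is_valid_path (board : List (List String)) (path : List (Int × Int)) (words : List (String × Bool)) : Prop :=
  ∀ c ∈ path, 0 ≤ c.1 → c.1 < (board.length : Int) → 0 ≤ c.2 →
    c.2 < ((board.headD []).length : Int) → c.2 < ((board.getD c.1.toNat []).length : Int)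
instance (board : List (List String)) (path : List (Int × Int)) (words : List (String × Bool)) : Decidable (Pre_is_valid_path board path words) := by unfold Pre_is_valid_path; infer_instance

def pvWitness_is_valid_path : List (List String) × (List (Int × Int)) × (List (String × Bool)) :=
  ([["a", "b"], ["c", "d"]], [(0, 0), (1, 1)], [("ad", true), ("x", false)])

def Spec_is_valid_path (board : List (List String)) (path : List (Int × Int)) (words : List (String × Bool)) (out : Option String) : Prop := out = is_valid_path_alt board path words
instance (board : List (List String)) (path : List (Int × Int)) (words : List (String × Bool)) (out : Option String) : Decidable (Spec_is_valid_path board path words out) := by unfold Spec_is_valid_path; infer_instance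

-- ===== CLAIM (what is proved, stated in full; the proofs are below) =====
def Claim_equal_is_valid_path : Prop := ∀ (board : List (List String)) (path : List (Int × Int)) (words : List (String × Bool)), Dom_is_valid_path board path words → Pre_is_valid_path board path words → Spec_is_valid_path board path words (is_valid_path board path words)

-- ===== LEMMAS AND PROOFS =====

-- the letter A and B read at a path cell
def pvLetter (board : List (List String)) (c : Int × Int) : String :=
  PySem.List.pyGetD (PySem.List.pyGetD board c.1 []) c.2 ""

-- B's arithmetic adjacency test agrees with A's membership in the 8 DIRECTIONS
theorem pv_adj_eq_dir (a b : Int × Int) : pvAdjacent a b = is_direction_valid_port a b := by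
  rw [Bool.eq_iff_iff]
  rcases a with ⟨ai, aj⟩
  rcases b with ⟨bi, bj⟩
  simp only [pvAdjacent, is_direction_valid_port, pyDirections, List.contains_eq_mem,
    List.mem_cons, List.not_mem_nil, or_false, decide_eq_true_eq, Bool.and_eq_true,
    Bool.not_eq_true', beq_eq_false_iff_ne, ne_eq, Prod.ext_iff]
  constructor
  · rintro ⟨⟨⟨⟨h1, h2⟩, h3⟩, h4⟩, h5⟩
    omega
  · intro h
    constructor
    · constructor
      · constructor
        · constructor <;> omega
        · omega
      · omega
    · omega

-- B's cell lookup succeeds exactly on A's bounds check, returning the shared letter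
theorem pv_cell_eq (board : List (List String)) (c : Int × Int) :
    pvCell board c.1 c.2 =
      if is_cell_in_board_port board c.1 c.2 then some (pvLetter board c) else none := by
  rfl

theorem pv_foldl_append_toList (l : List String) :
    ∀ acc : String, (l.foldl (· ++ ·) acc).toList = acc.toList ++ (l.map String.toList).flatten := by
  induction l with
  | nil => intro acc; simp
  | cons x l ih => intro acc; simp [ih, String.toList_append]

theorem pv_foldr_append_toList (l : List String) :
    (l.foldr (· ++ ·) "").toList = (l.map String.toList).flatten := by
  induction l with
  | nil => rfl
  | cons x l ih => simp [List.foldr_cons, String.toList_append, ih]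

theorem hc2_aux {n : Nat} (h : n ≤ 1) : ¬ 1 < n := Nat.not_lt.mpr h

-- B's recursion computes: some (letters concatenated back-to-front) iff the path has no
-- duplicates, every cell is in bounds and every consecutive step is adjacent
theorem pv_walk_spec (board : List (List String)) :
    ∀ path : List (Int × Int),
      pvWalk board path =
        if decide path.Nodup &&
           path.all (fun c => is_cell_in_board_port board c.1 c.2) &&
           ((path.zip (path.drop 1)).all (fun p => is_direction_valid_port p.1 p.2))
        then some ((path.map (pvLetter board)).foldr (· ++ ·) "")
        else none := by
  intro path
  induction path with
  | nil => simp [pvWalk]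
  | cons c rest ih =>
    rw [pvWalk]
    by_cases hdup : rest.contains c
    · have hmem : c ∈ rest := by simpa using hdup
      rw [if_pos hdup, if_neg (by simp [List.nodup_cons, hmem])]
    · have hmem : c ∉ rest := by simpa using hdup
      rw [if_neg hdup]
      cases rest with
      | nil =>
        simp [pvWalk, pv_cell_eq board c, pvLetter]
        by_cases hcell : is_cell_in_board_port board c.1 c.2 <;> simp [hcell]
      | cons d rest' =>
        by_cases hadj : pvAdjacent c d
        · rw [if_neg (by simp [List.headD, hadj])]
          rw [pv_cell_eq board c]
          by_cases hcell : is_cell_in_board_port board c.1 c.2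
          · rw [if_pos hcell, ih]
            by_cases hrest : (decide (d :: rest').Nodup &&
                (d :: rest').all (fun c => is_cell_in_board_port board c.1 c.2) &&
                ((d :: rest').zip ((d :: rest').drop 1)).all
                  (fun p => is_direction_valid_port p.1 p.2)) = true
            · rw [if_pos hrest]
              have hr := hrest
              simp only [Bool.and_eq_true, decide_eq_true_eq] at hr
              rw [if_pos (by
                simp only [List.drop_succ_cons, List.drop_zero, List.zip_cons_cons,
                  List.all_cons, Bool.and_eq_true, decide_eq_true_eq, List.nodup_cons]
                refine ⟨⟨⟨hmem, List.nodup_cons.mp hr.1.1⟩, hcell, ?_⟩, ?_, ?_⟩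
                · simpa using hr.1.2
                · rw [← pv_adj_eq_dir]; exact hadj
                · simpa using hr.2)]
              simp
            · rw [if_neg hrest, if_neg (by
                intro hfull
                apply hrest
                simp only [List.drop_succ_cons, List.drop_zero, List.zip_cons_cons,
                  List.all_cons, Bool.and_eq_true, decide_eq_true_eq, List.nodup_cons] at hfull ⊢
                tauto)]
          · rw [if_neg hcell, if_neg (by simp [hcell])]
        · rw [if_pos (by simp [List.headD, hadj])]
          rw [if_neg (by
            simp only [List.drop_succ_cons, List.drop_zero, List.zip_cons_cons, List.all_cons]
            rw [← pv_adj_eq_dir]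
            simp [hadj])]

-- A's loop on the suffix of path starting at index k
theorem pv_loop_spec (board : List (List String)) (path : List (Int × Int)) :
    ∀ (s : List (Int × Int)) (k : Nat), path.drop k = s → ∀ acc : String,
      is_valid_path_loop board path (PySem.List.enumerate s (k : Int)) acc =
        if (s.all (fun c => decide (PySem.List.count path c ≤ 1) &&
              is_cell_in_board_port board c.1 c.2)) &&
           ((s.zip (s.drop 1)).all (fun p => is_direction_valid_port p.1 p.2))
        then some ((s.map (pvLetter board)).foldl (· ++ ·) acc)
        else none := by
  intro s
  induction s with
  | nil =>
    intro k _ acc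
    simp [PySem.List.enumerate_nil, is_valid_path_loop]
  | cons c rest ih =>
    intro k hk acc
    have hlen : path.length = k + rest.length + 1 := by
      have h1 : (path.drop k).length = path.length - k := List.length_drop
      rw [hk] at h1
      have h2 : k < path.length := by
        by_contra hko
        rw [List.drop_eq_nil_of_le (Nat.le_of_not_lt hko)] at hk
        exact (List.cons_ne_nil c rest) hk.symm
      simp at h1
      omega
    have hdrop1 : path.drop (k + 1) = rest := by
      rw [← List.tail_drop, hk]
      rfl
    rw [PySem.List.enumerate_cons]
    rw [is_valid_path_loop]
    by_cases hcnt : PySem.List.count path c > 1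
    · have hc' : 1 < List.count c path := by
        simpa [PySem.List.count] using hcnt
      have hc2 : ¬ List.count c path ≤ 1 := Nat.not_le.mpr hc'
      simp [hc', hc2, PySem.List.count]
    · have hc1 : List.count c path ≤ 1 := by
        have := Nat.not_lt.mp hcnt
        simpa [PySem.List.count] using this
      have hc1' : ¬ PySem.List.count path c > 1 := hcnt
      by_cases hcell : is_cell_in_board_port board c.1 c.2
      · cases rest with
        | nil =>
          have hnotlt : ¬ ((k:Int) < (path.length : Int) - 1) := by
            simp only [hlen, List.length_nil]
            push_cast
            omega
          rw [if_neg (by simpa [PySem.List.count] using hc2_aux hc1), if_neg (by simp [hcell]),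
              if_neg (by simp [hnotlt])]
          simp [is_valid_path_loop, PySem.List.enumerate_nil, hc1, hcell, pvLetter,
            PySem.List.count]
        | cons d rest' =>
          have hlt : ((k:Int) < (path.length : Int) - 1) := by
            simp only [hlen, List.length_cons]
            push_cast
            omega
          have hget : PySem.List.pyGetD path ((k:Int) + 1) (0, 0) = d := by
            have he : ((k:Int) + 1) = ((k + 1 : Nat) : Int) := by push_cast; ring
            rw [he, PySem.List.pyGetD_natCast]
            have hgd : path.getD (k+1) (0,0) = (path.drop (k+1)).getD 0 (0,0) := by
              simp [List.getD, List.getElem?_drop]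
            rw [hgd, hdrop1]
            rfl
          rw [hget]
          by_cases hdir : is_direction_valid_port c d
          · rw [if_neg (by simpa [PySem.List.count] using hc2_aux hc1), if_neg (by simp [hcell]),
                if_neg (by simp [hdir])]
            have hihc : ((k:Int) + 1) = ((k + 1 : Nat) : Int) := by push_cast; ring
            rw [hihc, ih (k + 1) hdrop1 (acc ++ PySem.List.pyGetD (PySem.List.pyGetD board c.1 []) c.2 "")]
            by_cases hrest :
                (((d :: rest').all fun c => decide (PySem.List.count path c ≤ 1) &&
                    is_cell_in_board_port board c.1 c.2) &&
                  ((d :: rest').zip ((d :: rest').drop 1)).all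
                    (fun p => is_direction_valid_port p.1 p.2)) = true
            · rw [if_pos hrest]
              have hr := hrest
              simp only [List.drop_succ_cons, List.drop_zero, List.zip_cons_cons,
                List.all_cons, Bool.and_eq_true] at hr
              have hdc : decide (PySem.List.count path c ≤ 1) = true := by
                simpa [PySem.List.count] using hc1
              rw [if_pos (by
                simp only [List.drop_succ_cons, List.drop_zero, List.zip_cons_cons,
                  List.all_cons, Bool.and_eq_true] at hr ⊢
                tauto)]
              simp [pvLetter]
            · rw [if_neg hrest]
              rw [if_neg (by
                intro hfull
                apply hrest
                simp only [List.drop_succ_cons, List.drop_zero, List.zip_cons_cons,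
                  List.all_cons, Bool.and_eq_true] at hfull ⊢
                tauto)]
          · rw [if_neg (by simpa [PySem.List.count] using hc2_aux hc1), if_neg (by simp [hcell]),
                if_pos (by simp [hdir, hlt])]
            rw [if_neg (by
              simp only [List.drop_succ_cons, List.drop_zero, List.zip_cons_cons, List.all_cons]
              simp [hdir])]
      · rw [if_neg (by simpa [PySem.List.count] using hc2_aux hc1), if_pos (by simp [hcell])]
        rw [if_neg (by simp [hcell])]

-- A's per-step 'count ≤ 1' condition and B's Nodup-style condition coincide
theorem pv_cond_eq (board : List (List String)) (path : List (Int × Int)) :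
    ((path.all (fun c => decide (PySem.List.count path c ≤ 1) &&
         is_cell_in_board_port board c.1 c.2)) &&
       ((path.zip (path.drop 1)).all (fun p => is_direction_valid_port p.1 p.2)))
    = (decide path.Nodup &&
       path.all (fun c => is_cell_in_board_port board c.1 c.2) &&
       ((path.zip (path.drop 1)).all (fun p => is_direction_valid_port p.1 p.2))) := by
  rw [Bool.eq_iff_iff]
  simp only [Bool.and_eq_true, List.all_eq_true, Bool.and_eq_true, decide_eq_true_eq]
  constructor
  · rintro ⟨hall, hz⟩
    refine ⟨⟨?_, fun c hc => (hall c hc).2⟩, hz⟩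
    rw [List.nodup_iff_count_le_one]
    intro a
    by_cases ha : a ∈ path
    · simpa [PySem.List.count] using (hall a ha).1
    · simp [List.count_eq_zero_of_not_mem ha]
  · rintro ⟨⟨hnd, hall⟩, hz⟩
    refine ⟨fun c hc => ⟨?_, hall c hc⟩, hz⟩
    have := List.nodup_iff_count_le_one.mp hnd c
    simpa [PySem.List.count] using this

-- ===== VERDICT (by name: the statement is the Claim_ definition above) =====
theorem is_valid_path_spec : Claim_equal_is_valid_path := by
  intro board path words _hdom _hpre
  unfold Spec_is_valid_path
  by_cases hb : board.length = 0
  · simp [is_valid_path, is_valid_path_alt, hb]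
  · have hloop := pv_loop_spec board path path 0 (by simp) ""
    rw [Nat.cast_zero] at hloop
    have hword : (path.map (pvLetter board)).foldl (· ++ ·) "" =
        (path.map (pvLetter board)).foldr (· ++ ·) "" := by
      refine String.toList_inj.mp ?_
      rw [pv_foldl_append_toList, pv_foldr_append_toList]
      rfl
    unfold is_valid_path is_valid_path_alt
    rw [if_neg hb, if_neg hb, hloop, pv_cond_eq, pv_walk_spec, hword]
    by_cases hC : (decide path.Nodup &&
        path.all (fun c => is_cell_in_board_port board c.1 c.2) &&
        ((path.zip (path.drop 1)).all (fun p => is_direction_valid_port p.1 p.2))) = true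
    · rw [if_pos hC]
      by_cases hm : (words.any fun p =>
          p.1 == (path.map (pvLetter board)).foldr (· ++ ·) "") = true <;> simp [hm]
    · rw [if_neg hC]
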